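-- pv_equiv track=rewrite | github.com/goodmami/wn | wn/compat/sensekey.py | _unescape_oewn
-- ===== SOURCE A (Python) =====
-- OEWN_LEMMA_UNESCAPE_SEQUENCES = [
--     ('-ap-', "'"),
--     ('-ex-', '!'),
--     ('-cm-', ','),
--     ('-cn-', ':'),
--     ('-pl-', '+'),
--     ('-sl-', '/'),
-- ]
--
-- def _unescape_oewn(s: str) -> str:
--     lemma, _, rest = s.partition('__')
--     for esc, char in OEWN_LEMMA_UNESCAPE_SEQUENCES:
--         lemma = lemma.replace(esc, char)
--     rest = rest.replace('.', ':').replace('-sp-', '_')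
--     if rest:
--         return f'{lemma}%{rest}'
--     else:
--         return lemma
-- ===== SOURCE B (Python) =====
-- OEWN_LEMMA_UNESCAPE_SEQUENCES = [
--     ('-ap-', "'"),
--     ('-ex-', '!'),
--     ('-cm-', ','),
--     ('-cn-', ':'),
--     ('-pl-', '+'),
--     ('-sl-', '/'),
-- ]
--
--
-- def _unescape_oewn(s: str) -> str:
--     lemma, _, rest = s.partition('__')
--     table = dict(OEWN_LEMMA_UNESCAPE_SEQUENCES)
--     out = []
--     i = 0
--     while i < len(lemma):
--         chunk = lemma[i:i + 4]
--         if chunk in table: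
--             out.append(table[chunk])
--             i += 4
--         else:
--             out.append(lemma[i])
--             i += 1
--     buf = []
--     j = 0
--     while j < len(rest):
--         if rest[j] == '.':
--             buf.append(':')
--             j += 1
--         elif rest[j:j + 4] == '-sp-':
--             buf.append('_')
--             j += 4
--         else:
--             buf.append(rest[j])
--             j += 1
--     if buf:
--         return ''.join(out) + '%' + ''.join(buf)
--     else:
--         return ''.join(out)
-- ===== Notes on version B (the rewrite author's own statement) =====
-- stated objective: alternative
-- what changed: A runs six sequential full-string replace() passes over the lemma part (and two over the rest); B makes a single left-to-right scan per part, looking the 4-char chunk at the cursor up in a dict built once from OEWN_LEMMA_UNESCAPE_SEQUENCES.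
-- outside the precondition, e.g. on _unescape_oewn('-ex-ap-'): A returns "-ex'", B returns '!ap-'
import Mathlib
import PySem

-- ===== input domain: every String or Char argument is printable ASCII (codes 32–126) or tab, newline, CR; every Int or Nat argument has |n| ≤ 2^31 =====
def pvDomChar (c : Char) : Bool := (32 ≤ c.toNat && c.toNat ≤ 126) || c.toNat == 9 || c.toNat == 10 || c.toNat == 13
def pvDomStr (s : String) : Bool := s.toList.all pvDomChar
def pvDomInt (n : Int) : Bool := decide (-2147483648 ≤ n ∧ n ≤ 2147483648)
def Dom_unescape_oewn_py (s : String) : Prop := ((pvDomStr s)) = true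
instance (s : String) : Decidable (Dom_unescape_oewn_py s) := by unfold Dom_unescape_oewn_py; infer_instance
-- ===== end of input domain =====

-- B replaces A's six sequential full-string `replace` passes over the lemma (and two over the rest)
-- by ONE left-to-right scan per part with a table lookup (objective: alternative single-pass algorithm,
-- same asymptotic cost). Equality of return values is proved for all inputs satisfying Pre_ below.

-- ===== PORT A =====
-- shared helper: the partition of s at the first double-underscore separator (both Pythons call the same built-in)
def pyPartition2 (l : List Char) : List Char × List Char :=
  let f := PySem.Chars.find l ['_', '_']
  if f = -1 then (l, []) else (l.take f.toNat, l.drop (f.toNat + 2))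

-- OEWN_LEMMA_UNESCAPE_SEQUENCES
def oewnSeqs : List (List Char × List Char) :=
  [(['-','a','p','-'], ['\'']),
   (['-','e','x','-'], ['!']),
   (['-','c','m','-'], [',']),
   (['-','c','n','-'], [':']),
   (['-','p','l','-'], ['+']),
   (['-','s','l','-'], ['/'])]

def unescape_oewn_py (s : String) : String :=
  let p := pyPartition2 s.toList
  let lm := oewnSeqs.foldl (fun lm pr => PySem.Chars.replace lm pr.1 pr.2) p.1
  let rest := PySem.Chars.replace (PySem.Chars.replace p.2 ['.'] [':']) ['-','s','p','-'] ['_']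
  if rest ≠ [] then String.ofList (lm ++ '%' :: rest) else String.ofList lm

-- ===== PORT B =====
-- table = dict(OEWN_LEMMA_UNESCAPE_SEQUENCES); lookup of the 4-char chunk at the cursor
def lemTable : List (List Char × Char) :=
  [(['-','a','p','-'], '\''),
   (['-','e','x','-'], '!'),
   (['-','c','m','-'], ','),
   (['-','c','n','-'], ':'),
   (['-','p','l','-'], '+'),
   (['-','s','l','-'], '/')]

def patOf? (l : List Char) : Option (List Char × Char) :=
  lemTable.find? (fun q => decide (l.take 4 = q.1))

-- the single pass over the lemma part (B's first while loop)
def scanLemma : List Char → List Char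
  | [] => []
  | c :: t =>
    match patOf? (c :: t) with
    | some q => q.2 :: scanLemma (t.drop 3)
    | none => c :: scanLemma t
  termination_by l => l.length
  decreasing_by
  · simp only [List.length_cons, List.length_drop]; omega
  · simp

-- the single pass over the rest part (B's second while loop)
def scanRest : List Char → List Char
  | [] => []
  | c :: t =>
    if c = '.' then ':' :: scanRest t
    else if (c :: t).take 4 = ['-','s','p','-'] then '_' :: scanRest (t.drop 3)
    else c :: scanRest t
  termination_by l => l.length
  decreasing_by
  · simp
  · simp only [List.length_cons, List.length_drop]; omega
  · simp

def unescape_oewn_py_alt (s : String) : String :=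
  let p := pyPartition2 s.toList
  let out := scanLemma p.1
  let buf := scanRest p.2
  if buf ≠ [] then String.ofList (out ++ '%' :: buf) else String.ofList out

-- ===== PRECONDITION & SPEC =====
-- no two occurrences of DISTINCT escape sequences overlap (they can only overlap sharing a '-', i.e. at offset 3)
def ndB : List Char → Bool
  | [] => true
  | c :: t =>
    (match patOf? (c :: t), patOf? ((c :: t).drop 3) with
     | some p, some q => decide (p = q)
     | _, _ => true) && ndB t

-- Pre_ excludes strings whose lemma part (before the first double-underscore separator) contains overlapping occurrences of two distinct
-- escape sequences (e.g. '-ex-ap-'): there A's result depends on the accidental order of its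
-- replacement passes, B resolves the overlap left to right, and neither choice is specified.
def Pre_unescape_oewn_py (s : String) : Prop := ndB (pyPartition2 s.toList).1 = true
instance (s : String) : Decidable (Pre_unescape_oewn_py s) := by unfold Pre_unescape_oewn_py; infer_instance

def pvWitness_unescape_oewn_py : String := "zn-ap-x-cm-__1.23.sk-sp-q"

def Spec_unescape_oewn_py (s : String) (out : String) : Prop := out = unescape_oewn_py_alt s
instance (s : String) (out : String) : Decidable (Spec_unescape_oewn_py s out) := by
  unfold Spec_unescape_oewn_py; infer_instance

-- ===== CLAIM (what is proved, stated in full; the proofs are below) =====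
def Claim_equal_unescape_oewn_py : Prop :=
  ∀ (s : String), Dom_unescape_oewn_py s → Pre_unescape_oewn_py s →
    Spec_unescape_oewn_py s (unescape_oewn_py s)

-- ===== LEMMAS AND PROOFS =====
lemma go_acc (old new : List Char) (fuel : Nat) (l acc : List Char) :
    PySem.Chars.replace.go old new fuel l acc
      = acc.reverse ++ PySem.Chars.replace.go old new fuel l [] := by
  induction fuel generalizing l acc with
  | zero => simp [PySem.Chars.replace.go]
  | succ n ih =>
    cases l with
    | nil => simp [PySem.Chars.replace.go]
    | cons c t =>
      rw [PySem.Chars.replace.go, PySem.Chars.replace.go]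
      split
      · rw [ih (acc := new.reverse ++ acc), ih (acc := new.reverse ++ [])]; simp
      · rw [ih (acc := c :: acc), ih (acc := [c])]; simp

lemma go_fuel (old new : List Char) (h : old ≠ []) (fuel fuel' : Nat) (l acc : List Char)
    (h1 : l.length ≤ fuel) (h2 : l.length ≤ fuel') :
    PySem.Chars.replace.go old new fuel l acc = PySem.Chars.replace.go old new fuel' l acc := by
  induction fuel generalizing l acc fuel' with
  | zero =>
    have : l = [] := by cases l <;> simp_all
    subst this
    cases fuel' <;> simp [PySem.Chars.replace.go]
  | succ n ih =>
    cases l with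
    | nil => cases fuel' <;> simp [PySem.Chars.replace.go]
    | cons c t =>
      cases fuel' with
      | zero => simp at h2
      | succ m =>
        rw [PySem.Chars.replace.go, PySem.Chars.replace.go]
        split
        · apply ih
          · have hol : 1 ≤ old.length := by cases old <;> simp_all
            simp only [List.length_drop, List.length_cons] at *
            omega
          · have hol : 1 ≤ old.length := by cases old <;> simp_all
            simp only [List.length_drop, List.length_cons] at *
            omega
        · apply ih <;> simp_all

lemma replace_nil (old new : List Char) (h : old ≠ []) :
    PySem.Chars.replace [] old new = [] := by
  rw [PySem.Chars.replace]
  simp [h, PySem.Chars.replace.go]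

lemma replace_cons_match (old new l : List Char) (h : old ≠ []) (hp : old <+: l) :
    PySem.Chars.replace l old new = new ++ PySem.Chars.replace (l.drop old.length) old new := by
  rw [PySem.Chars.replace, PySem.Chars.replace]
  have hne : old.isEmpty = false := by cases old <;> simp_all
  simp only [hne, Bool.false_eq_true, if_false]
  cases l with
  | nil => exact absurd (List.prefix_nil.mp hp) h
  | cons c t =>
    simp only [List.length_cons]
    rw [PySem.Chars.replace.go]
    have hpb : old.isPrefixOf (c :: t) = true := List.isPrefixOf_iff_prefix.mpr hp
    simp only [hpb, if_true]
    rw [go_acc]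
    have hol : 1 ≤ old.length := by cases old <;> simp_all
    rw [go_fuel old new h (l := List.drop old.length (c :: t))
      (fuel := t.length) (fuel' := (List.drop old.length (c :: t)).length)]
    · simp
    · simp; omega
    · simp
lemma replace_cons_nomatch (old new : List Char) (c : Char) (t : List Char)
    (h : old ≠ []) (hnp : ¬ old <+: (c :: t)) :
    PySem.Chars.replace (c :: t) old new = c :: PySem.Chars.replace t old new := by
  rw [PySem.Chars.replace, PySem.Chars.replace]
  have hne : old.isEmpty = false := by cases old <;> simp_all
  simp only [hne, Bool.false_eq_true, if_false, List.length_cons]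
  rw [PySem.Chars.replace.go]
  have hpb : old.isPrefixOf (c :: t) = false := by
    rw [Bool.eq_false_iff]
    intro hc
    exact hnp (List.isPrefixOf_iff_prefix.mp hc)
  simp only [hpb, Bool.false_eq_true, if_false]
  rw [go_acc]
  simp

lemma prefix_preserve (old : List Char) (r : Char) (hold : old ≠ []) :
    ∀ n (w u : List Char), w.length ≤ n → u ≠ [] → r ∉ u → ¬ u <+: w →
      ¬ u <+: PySem.Chars.replace w old [r] := by
  intro n
  induction n with
  | zero =>
    intro w u hw hu hr hp
    have : w = [] := by cases w <;> simp_all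
    subst this
    rw [replace_nil _ _ hold]
    exact hp
  | succ m ih =>
    intro w u hw hu hr hp
    cases w with
    | nil => rw [replace_nil _ _ hold]; exact hp
    | cons c t =>
      by_cases hm : old <+: (c :: t)
      · rw [replace_cons_match _ _ _ hold hm]
        cases u with
        | nil => exact absurd rfl hu
        | cons d u' =>
          intro hpre
          have hd : d = r := by
            rcases hpre with ⟨s, hs⟩
            have h2 := congrArg List.head? hs
            simpa using h2
          exact hr (hd ▸ List.mem_cons_self)
      · rw [replace_cons_nomatch _ _ _ _ hold hm]
        cases u with
        | nil => exact absurd rfl hu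
        | cons d u' =>
          rw [List.cons_prefix_cons]
          rintro ⟨hd, hpre⟩
          subst hd
          rcases eq_or_ne u' [] with h | h
          · subst h
            exact hp (by simp [List.cons_prefix_cons])
          · have hu't : ¬ u' <+: t := fun hc => hp (List.cons_prefix_cons.mpr ⟨rfl, hc⟩)
            exact ih t u' (by simpa using Nat.lt_succ_iff.mp (by simpa using hw)) h
              (fun hc => hr (List.mem_cons_of_mem _ hc)) hu't hpre


lemma oewn_good : ∀ q ∈ oewnSeqs, q.1.length = 4 ∧ q.1.head? = some '-' ∧ q.2.length = 1 := by
  intro q hq; fin_cases hq <;> exact ⟨rfl, rfl, rfl⟩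

lemma oewn_fresh : ∀ q ∈ oewnSeqs, ∀ p ∈ oewnSeqs, ∀ c ∈ q.2, ¬ c ∈ p.1 := by
  intro q hq p hp c hc
  fin_cases hq <;> fin_cases hp <;> simp_all

lemma oewn_keyinj : ∀ p ∈ oewnSeqs, ∀ q ∈ oewnSeqs, p.1 = q.1 → p = q := by
  intro p hp q hq
  fin_cases hp <;> fin_cases hq <;> simp

lemma oewn_eq_map : oewnSeqs = lemTable.map (fun q => (q.1, [q.2])) := by rfl

lemma lemTable_len4 : ∀ q ∈ lemTable, q.1.length = 4 := by
  intro q hq; fin_cases hq <;> rfl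

lemma lemTable_keyinj : ∀ p ∈ lemTable, ∀ q ∈ lemTable, p.1 = q.1 → p = q := by
  intro p hp q hq
  fin_cases hp <;> fin_cases hq <;> simp

lemma lemTable_last : ∀ q ∈ lemTable, q.1[3]? = some '-' := by
  intro q hq; fin_cases hq <;> rfl

lemma fold_nil (ps : List (List Char × List Char)) (H : ∀ q ∈ ps, q.1 ≠ []) :
    List.foldl (fun lm pr => PySem.Chars.replace lm pr.1 pr.2) [] ps = [] := by
  induction ps with
  | nil => rfl
  | cons q ps' ih =>
    simp only [List.foldl_cons]
    rw [replace_nil _ _ (H q List.mem_cons_self)]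
    exact ih (fun q hq => H q (List.mem_cons_of_mem _ hq))

lemma fold_keep_head (r : Char) (hr : r ≠ '-') :
    ∀ (ps : List (List Char × List Char)), (∀ q ∈ ps, q ∈ oewnSeqs) →
    ∀ u, List.foldl (fun lm pr => PySem.Chars.replace lm pr.1 pr.2) (r :: u) ps
        = r :: List.foldl (fun lm pr => PySem.Chars.replace lm pr.1 pr.2) u ps := by
  intro ps
  induction ps with
  | nil => intro _ u; rfl
  | cons q ps' ih =>
    intro hsub u
    have hg := oewn_good q (hsub q List.mem_cons_self)
    have hne : q.1 ≠ [] := by intro h; rw [h] at hg; simp at hg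
    have hnm : ¬ q.1 <+: (r :: u) := by
      cases hq1 : q.1 with
      | nil => exact absurd hq1 hne
      | cons d u' =>
        rw [hq1] at hg
        have hd : d = '-' := by simpa using hg.2.1
        subst hd
        rw [List.cons_prefix_cons]
        rintro ⟨h1, -⟩
        exact hr h1.symm
    simp only [List.foldl_cons]
    rw [replace_cons_nomatch _ _ _ _ hne hnm]
    exact ih (fun q hq => hsub q (List.mem_cons_of_mem _ hq)) _

lemma fold_no_match :
    ∀ (ps : List (List Char × List Char)), (∀ q ∈ ps, q ∈ oewnSeqs) →
    ∀ (c : Char) (t : List Char), (∀ p ∈ oewnSeqs, ¬ p.1 <+: (c :: t)) →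
      List.foldl (fun lm pr => PySem.Chars.replace lm pr.1 pr.2) (c :: t) ps
          = c :: List.foldl (fun lm pr => PySem.Chars.replace lm pr.1 pr.2) t ps ∧
        (∀ p ∈ oewnSeqs, ¬ p.1 <+: c :: List.foldl (fun lm pr => PySem.Chars.replace lm pr.1 pr.2) t ps) := by
  intro ps
  induction ps with
  | nil => exact fun _ c t h => ⟨rfl, h⟩
  | cons q ps' ih =>
    intro hsub c t h
    have hqmem := hsub q List.mem_cons_self
    have hg := oewn_good q hqmem
    have hne : q.1 ≠ [] := by intro hq; rw [hq] at hg; simp at hg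
    obtain ⟨rq, hrq⟩ := List.length_eq_one_iff.mp hg.2.2
    -- the pass over q does not touch the head and keeps all heads unmatched
    have hstep : PySem.Chars.replace (c :: t) q.1 q.2 = c :: PySem.Chars.replace t q.1 q.2 :=
      replace_cons_nomatch _ _ _ _ hne (h q hqmem)
    have hpres : ∀ p ∈ oewnSeqs, ¬ p.1 <+: c :: PySem.Chars.replace t q.1 q.2 := by
      intro p hp hcon
      have hgp := oewn_good p hp
      cases hp1 : p.1 with
      | nil => rw [hp1] at hgp; simp at hgp
      | cons d u =>
        rw [hp1] at hcon
        rw [List.cons_prefix_cons] at hcon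
        obtain ⟨hd, hcon⟩ := hcon
        subst hd
        have hu_ne : u ≠ [] := by
          intro hu; rw [hp1, hu] at hgp; simp at hgp
        have hnt : ¬ u <+: t := by
          intro hut
          exact h p hp (by rw [hp1]; exact List.cons_prefix_cons.mpr ⟨rfl, hut⟩)
        have hfr : rq ∉ u := by
          have := oewn_fresh q hqmem p hp rq (by rw [hrq]; exact List.mem_cons_self)
          rw [hp1] at this
          exact fun hm => this (List.mem_cons_of_mem _ hm)
        rw [hrq] at hcon
        exact prefix_preserve q.1 rq hne t.length t u le_rfl hu_ne hfr hnt hcon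
    constructor
    · simp only [List.foldl_cons]
      rw [hstep]
      exact (ih (fun q hq => hsub q (List.mem_cons_of_mem _ hq)) c _ hpres).1
    · simp only [List.foldl_cons]
      exact (ih (fun q hq => hsub q (List.mem_cons_of_mem _ hq)) c _ hpres).2

lemma step_over (p q : List Char × List Char) (hp : p ∈ oewnSeqs) (hq : q ∈ oewnSeqs)
    (hne : q ≠ p) (t : List Char) (h3 : ¬ q.1.drop 1 <+: t) :
    PySem.Chars.replace (p.1 ++ t) q.1 q.2 = p.1 ++ PySem.Chars.replace t q.1 q.2 := by
  have hgq := oewn_good q hq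
  have hgp := oewn_good p hp
  have hqne : q.1 ≠ [] := by intro h; rw [h] at hgq; simp at hgq
  obtain ⟨u, hq1⟩ : ∃ u, q.1 = '-' :: u := by
    cases hq1 : q.1 with
    | nil => exact absurd hq1 hqne
    | cons d u =>
      rw [hq1] at hgq
      exact ⟨u, by rw [show d = '-' by simpa using hgq.2.1]⟩
  have h0 : ¬ q.1 <+: p.1 ++ t := by
    intro hcon
    have h4 : q.1 = (p.1 ++ t).take q.1.length := List.prefix_iff_eq_take.mp hcon
    rw [hgq.1, ← hgp.1, List.take_left] at h4
    exact hne (oewn_keyinj q hq p hp h4)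
  have hmid : ∀ (d : Char), d ≠ '-' → ∀ rest, ¬ q.1 <+: d :: rest := by
    intro d hd rest hcon
    rw [hq1, List.cons_prefix_cons] at hcon
    exact hd hcon.1.symm
  have hlast : ¬ q.1 <+: '-' :: t := by
    intro hcon
    rw [hq1, List.cons_prefix_cons] at hcon
    exact h3 (by rw [hq1]; exact hcon.2)
  fin_cases hp <;>
    simp only [List.cons_append, List.nil_append] at h0 ⊢ <;>
    rw [replace_cons_nomatch _ _ _ _ hqne h0,
      replace_cons_nomatch _ _ _ _ hqne (hmid _ (by decide) _),
      replace_cons_nomatch _ _ _ _ hqne (hmid _ (by decide) _),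
      replace_cons_nomatch _ _ _ _ hqne hlast]

lemma fold_match (p : List Char × List Char) (hp_mem : p ∈ oewnSeqs) :
    ∀ (ps : List (List Char × List Char)), (∀ q ∈ ps, q ∈ oewnSeqs) → p ∈ ps →
    ∀ t, (∀ q ∈ ps, q ≠ p → ¬ q.1.drop 1 <+: t) →
      List.foldl (fun lm pr => PySem.Chars.replace lm pr.1 pr.2) (p.1 ++ t) ps
        = p.2 ++ List.foldl (fun lm pr => PySem.Chars.replace lm pr.1 pr.2) t ps := by
  intro ps
  induction ps with
  | nil => intro _ h; simp at h
  | cons q ps' ih =>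
    intro hsub hpin t hnm3
    have hgp := oewn_good p hp_mem
    have hpne : p.1 ≠ [] := by intro h; rw [h] at hgp; simp at hgp
    obtain ⟨rp, hrp⟩ := List.length_eq_one_iff.mp hgp.2.2
    by_cases hqp : q = p
    · subst hqp
      simp only [List.foldl_cons]
      rw [replace_cons_match _ _ _ hpne (List.prefix_append _ _), List.drop_left]
      have hrp_ne : rp ≠ '-' := by
        intro h
        subst h
        have hfr := oewn_fresh q hp_mem q hp_mem '-' (by rw [hrp]; exact List.mem_cons_self)
        have hmm : '-' ∈ q.1 := by
          cases hql : q.1 with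
          | nil => exact absurd hql hpne
          | cons d u =>
            rw [hql] at hgp
            have hd : d = '-' := by simpa using hgp.2.1
            rw [hd]
            exact List.mem_cons_self
        exact hfr hmm
      rw [hrp]
      simp only [List.cons_append, List.nil_append]
      rw [fold_keep_head rp hrp_ne ps' (fun q hq => hsub q (List.mem_cons_of_mem _ hq)) _]
    · have hqmem := hsub q List.mem_cons_self
      have hgq := oewn_good q hqmem
      have hqne : q.1 ≠ [] := by intro h; rw [h] at hgq; simp at hgq
      obtain ⟨rq, hrq⟩ := List.length_eq_one_iff.mp hgq.2.2
      simp only [List.foldl_cons]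
      rw [step_over p q hp_mem hqmem hqp t (hnm3 q List.mem_cons_self hqp)]
      have hp' : p ∈ ps' := by
        rcases List.mem_cons.mp hpin with h | h
        · exact absurd h.symm hqp
        · exact h
      rw [ih (fun q hq => hsub q (List.mem_cons_of_mem _ hq)) hp'
        (PySem.Chars.replace t q.1 q.2) ?_]
      intro q' hq' hq'p
      have hq'mem := hsub q' (List.mem_cons_of_mem _ hq')
      have hgq' := oewn_good q' hq'mem
      have hu_ne : q'.1.drop 1 ≠ [] := by
        intro h
        have := congrArg List.length h
        simp [hgq'.1] at this
      have hfr : rq ∉ q'.1.drop 1 := by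
        have := oewn_fresh q hqmem q' hq'mem rq (by rw [hrq]; exact List.mem_cons_self)
        exact fun hm => this (List.mem_of_mem_drop hm)
      have hnt : ¬ q'.1.drop 1 <+: t := hnm3 q' (List.mem_cons_of_mem _ hq') hq'p
      rw [hrq]
      exact prefix_preserve q.1 rq hqne t.length t (q'.1.drop 1) le_rfl hu_ne hfr hnt

lemma lemTable_head : ∀ q ∈ lemTable, q.1.head? = some '-' := by
  intro q hq; fin_cases hq <;> rfl

lemma ndB_tail (c : Char) (t : List Char) (h : ndB (c :: t) = true) : ndB t = true := by
  simp only [ndB, Bool.and_eq_true] at h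
  exact h.2

lemma ndB_drop (k : Nat) : ∀ l, ndB l = true → ndB (l.drop k) = true := by
  induction k with
  | zero => simp
  | succ n ih =>
    intro l h
    cases l with
    | nil => simpa using h
    | cons c t =>
      rw [List.drop_succ_cons]
      exact ih t (ndB_tail c t h)

lemma scanLemma_nil : scanLemma [] = [] := by rw [scanLemma]

lemma scanLemma_cons_some (c : Char) (t : List Char) (q : List Char × Char)
    (h : patOf? (c :: t) = some q) : scanLemma (c :: t) = q.2 :: scanLemma (t.drop 3) := by
  rw [scanLemma, h]

lemma scanLemma_cons_none (c : Char) (t : List Char)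
    (h : patOf? (c :: t) = none) : scanLemma (c :: t) = c :: scanLemma t := by
  rw [scanLemma, h]

lemma oewn_ne_nil : ∀ q ∈ oewnSeqs, q.1 ≠ [] := by
  intro q hq h
  have := (oewn_good q hq).1
  rw [h] at this
  simp at this

lemma main_lemma : ∀ n (l : List Char), l.length ≤ n → ndB l = true →
    List.foldl (fun lm pr => PySem.Chars.replace lm pr.1 pr.2) l oewnSeqs = scanLemma l := by
  intro n
  induction n with
  | zero =>
    intro l hl _
    have : l = [] := by cases l <;> simp_all
    subst this
    rw [fold_nil _ oewn_ne_nil, scanLemma_nil]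
  | succ m ih =>
    intro l hl hnd
    cases l with
    | nil => rw [fold_nil _ oewn_ne_nil, scanLemma_nil]
    | cons c t =>
      cases hpo : patOf? (c :: t) with
      | none =>
        have hno : ∀ p ∈ oewnSeqs, ¬ p.1 <+: (c :: t) := by
          intro p hp hcon
          rw [oewn_eq_map] at hp
          obtain ⟨π, hπ, rfl⟩ := List.mem_map.mp hp
          have htake : (c :: t).take 4 = π.1 := by
            have h4 := lemTable_len4 π hπ
            have := List.prefix_iff_eq_take.mp hcon
            simp only [h4] at this
            exact this.symm
          have hpoF : lemTable.find? (fun q => decide ((c :: t).take 4 = q.1)) = none := hpo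
          exact (List.find?_eq_none.mp hpoF π hπ (decide_eq_true htake)).elim
        obtain ⟨he, -⟩ := fold_no_match oewnSeqs (fun q hq => hq) c t hno
        rw [he, scanLemma_cons_none c t hpo,
          ih t (by simpa using Nat.lt_succ_iff.mp (by simpa using hl)) (ndB_tail c t hnd)]
      | some qc =>
        have hpoF : lemTable.find? (fun q => decide ((c :: t).take 4 = q.1)) = some qc := hpo
        have hqc_mem : qc ∈ lemTable := List.mem_of_find?_eq_some hpoF
        have hqc_take : (c :: t).take 4 = qc.1 := by
          have h := List.find?_some (p := fun q : List Char × Char => decide ((c :: t).take 4 = q.1)) hpoF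
          simpa using h
        have hqlen : qc.1.length = 4 := lemTable_len4 qc hqc_mem
        have hllen : 4 ≤ (c :: t).length := by
          have := congrArg List.length hqc_take
          simp only [List.length_take, hqlen] at this
          omega
        have hp_mem : (qc.1, [qc.2]) ∈ oewnSeqs := by
          rw [oewn_eq_map]
          exact List.mem_map.mpr ⟨qc, hqc_mem, rfl⟩
        have hsplit : c :: t = qc.1 ++ (c :: t).drop 4 := by
          conv_lhs => rw [← List.take_append_drop 4 (c :: t)]
          rw [hqc_take]
        have hdrop3 : (c :: t).drop 3 = '-' :: (c :: t).drop 4 := by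
          rw [List.drop_eq_getElem_cons (by omega : 3 < (c :: t).length)]
          have h37 : (c :: t)[3]? = some '-' := by
            have hlast := lemTable_last qc hqc_mem
            rw [← hqc_take] at hlast
            rwa [List.getElem?_take_of_lt (by omega : (3:Nat) < 4)] at hlast
          have h3v : (c :: t)[3] = '-' := by
            have hg := List.getElem?_eq_getElem (l := c :: t) (by omega : 3 < (c :: t).length)
            rw [hg] at h37
            exact Option.some_injective _ h37
          congr 1
        have hnm3 : ∀ q ∈ oewnSeqs, q ≠ (qc.1, [qc.2]) → ¬ q.1.drop 1 <+: (c :: t).drop 4 := by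
          intro q hq hqp hcon
          rw [oewn_eq_map] at hq
          obtain ⟨π, hπ, rfl⟩ := List.mem_map.mp hq
          have hπlen := lemTable_len4 π hπ
          obtain ⟨u, hu⟩ : ∃ u, π.1 = '-' :: u := by
            have hh := lemTable_head π hπ
            cases hπ1 : π.1 with
            | nil => rw [hπ1] at hπlen; simp at hπlen
            | cons d u =>
              rw [hπ1] at hh
              exact ⟨u, by rw [show d = '-' by simpa using hh]⟩
          have hpre : π.1 <+: (c :: t).drop 3 := by
            rw [hdrop3, hu]
            exact List.cons_prefix_cons.mpr ⟨rfl, by simpa [hu] using hcon⟩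
          have htake2 : ((c :: t).drop 3).take 4 = π.1 := by
            have := List.prefix_iff_eq_take.mp hpre
            simp only [hπlen] at this
            exact this.symm
          have hfo : patOf? ((c :: t).drop 3) = some π := by
            cases hfo' : patOf? ((c :: t).drop 3) with
            | none =>
              have hfoF : lemTable.find? (fun q => decide (((c :: t).drop 3).take 4 = q.1)) = none := hfo'
              exact (List.find?_eq_none.mp hfoF π hπ (decide_eq_true htake2)).elim
            | some π' =>
              have hfoF : lemTable.find? (fun q => decide (((c :: t).drop 3).take 4 = q.1)) = some π' := hfo'
              have hm' := List.mem_of_find?_eq_some hfoF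
              have ht' : ((c :: t).drop 3).take 4 = π'.1 := by
                have h := List.find?_some (p := fun q : List Char × Char => decide (((c :: t).drop 3).take 4 = q.1)) hfoF
                simpa using h
              rw [lemTable_keyinj π' hm' π hπ (by rw [← ht', htake2])]
          simp only [ndB, Bool.and_eq_true] at hnd
          obtain ⟨h1, -⟩ := hnd
          rw [hpo, hfo] at h1
          simp only [decide_eq_true_eq] at h1
          exact hqp (by rw [h1])
        conv_lhs => rw [hsplit]
        rw [fold_match (qc.1, [qc.2]) hp_mem oewnSeqs (fun q hq => hq) hp_mem _ hnm3]
        rw [scanLemma_cons_some c t qc hpo]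
        have hdt : (c :: t).drop 4 = t.drop 3 := rfl
        rw [hdt]
        rw [ih (t.drop 3) (by simp only [List.length_drop, List.length_cons] at hl ⊢; omega)
          (by rw [← hdt]; exact ndB_drop 4 _ hnd)]
        rfl

lemma scanRest_nil : scanRest [] = [] := by rw [scanRest]

lemma scanRest_cons (c : Char) (t : List Char) :
    scanRest (c :: t) =
      if c = '.' then ':' :: scanRest t
      else if (c :: t).take 4 = ['-','s','p','-'] then '_' :: scanRest (t.drop 3)
      else c :: scanRest t := by
  rw [scanRest]

lemma rest_eq : ∀ n (l : List Char), l.length ≤ n →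
    PySem.Chars.replace (PySem.Chars.replace l ['.'] [':']) ['-','s','p','-'] ['_'] = scanRest l := by
  intro n
  induction n with
  | zero =>
    intro l hl
    have : l = [] := by cases l <;> simp_all
    subst this
    rw [replace_nil _ _ (by decide), replace_nil _ _ (by decide), scanRest_nil]
  | succ m ih =>
    intro l hl
    cases l with
    | nil => rw [replace_nil _ _ (by decide), replace_nil _ _ (by decide), scanRest_nil]
    | cons c t =>
      by_cases hc : c = '.'
      · subst hc
        rw [replace_cons_match ['.'] [':'] _ (by decide) (List.cons_prefix_cons.mpr ⟨rfl, List.nil_prefix⟩)]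
        simp only [List.length_cons, List.length_nil, List.drop_succ_cons, List.drop_zero,
          List.singleton_append]
        rw [replace_cons_nomatch _ _ _ _ (by decide) (by
          intro hcon
          rw [List.cons_prefix_cons] at hcon
          exact absurd hcon.1 (by decide))]
        rw [scanRest_cons, if_pos rfl, ih t (by simpa using Nat.lt_succ_iff.mp (by simpa using hl))]
      · by_cases hsp : (c :: t).take 4 = ['-','s','p','-']
        · have hc_eq : c = '-' := by
            have h := congrArg List.head? hsp
            simpa using h
          subst hc_eq
          have ht3 : t.take 3 = ['s','p','-'] := by
            have h4 : List.take 4 ('-' :: t) = '-' :: t.take 3 := rfl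
            have h := hsp
            rw [h4, List.cons.injEq] at h
            exact h.2
          have hv : t = 's' :: 'p' :: '-' :: t.drop 3 := by
            conv_lhs => rw [← List.take_append_drop 3 t]
            rw [ht3]
            rfl
          have hdot : ∀ (d : Char), d ≠ '.' → ∀ (rest : List Char),
              ¬ ['.'] <+: d :: rest := by
            intro d hd rest hcon
            rw [List.cons_prefix_cons] at hcon
            exact hd hcon.1.symm
          rw [scanRest_cons, if_neg (by decide), if_pos hsp]
          conv_lhs => rw [hv]
          rw [replace_cons_nomatch _ _ _ _ (by decide) (hdot '-' (by decide) _),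
            replace_cons_nomatch _ _ _ _ (by decide) (hdot 's' (by decide) _),
            replace_cons_nomatch _ _ _ _ (by decide) (hdot 'p' (by decide) _),
            replace_cons_nomatch _ _ _ _ (by decide) (hdot '-' (by decide) _)]
          rw [replace_cons_match ['-','s','p','-'] ['_'] _ (by decide) (by
            exact List.cons_prefix_cons.mpr ⟨rfl, List.cons_prefix_cons.mpr ⟨rfl,
              List.cons_prefix_cons.mpr ⟨rfl, List.cons_prefix_cons.mpr ⟨rfl, List.nil_prefix⟩⟩⟩⟩)]
          simp only [List.length_cons, List.length_nil, List.drop_succ_cons, List.drop_zero,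
            List.singleton_append]
          rw [ih (t.drop 3) (by simp only [List.length_drop, List.length_cons] at hl ⊢; omega)]
        · rw [replace_cons_nomatch _ _ _ _ (by decide) (by
            intro hcon
            rw [List.cons_prefix_cons] at hcon
            exact hc hcon.1.symm)]
          have hnosp : ¬ ['-','s','p','-'] <+: c :: PySem.Chars.replace t ['.'] [':'] := by
            intro hcon
            rw [List.cons_prefix_cons] at hcon
            obtain ⟨hc_eq, hcon⟩ := hcon
            have hnt : ¬ ['s','p','-'] <+: t := by
              intro h2
              apply hsp
              rw [← hc_eq]
              have := List.prefix_iff_eq_take.mp h2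
              simp only [List.length_cons, List.length_nil] at this
              simp only [List.take_succ_cons, ← this]
            exact prefix_preserve ['.'] ':' (by decide) t.length t ['s','p','-'] le_rfl
              (by decide) (by decide) hnt hcon
          rw [replace_cons_nomatch _ _ _ _ (by decide) hnosp]
          rw [scanRest_cons, if_neg hc, if_neg hsp,
            ih t (by simpa using Nat.lt_succ_iff.mp (by simpa using hl))]

-- ===== VERDICT (by name: the statement is the Claim_ definition above) =====
theorem unescape_oewn_py_spec : Claim_equal_unescape_oewn_py := by
  intro s _ hpre
  unfold Pre_unescape_oewn_py at hpre
  unfold Spec_unescape_oewn_py unescape_oewn_py unescape_oewn_py_alt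
  simp only []
  rw [main_lemma (pyPartition2 s.toList).1.length _ le_rfl hpre,
    rest_eq (pyPartition2 s.toList).2.length _ le_rfl]
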